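-- pv_equiv track=rewrite | github.com/Mellanox/ALVS | verification/testing/ATC/cli_commands.py | get_actions_statistics
-- ===== SOURCE A (Python) =====
-- def get_actions_statistics(handle_stats):
-- 	lst_of_actions_stats = []
-- 	handle_stats_splitted = handle_stats.split('\n')
-- 	action = ''
-- 	start_flag = False
-- 	for line in handle_stats_splitted:
-- 		if len(line.split(' ')) > 0 and line.split(' ')[0] == 'action':
-- 			start_flag = True
-- 			if action != '':
-- 				lst_of_actions_stats.append(action)
-- 			action = line + '\n'
-- 		elif start_flag:
-- 			action += line + '\n'
-- 	if action != '':
-- 		lst_of_actions_stats.append(action)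
-- 	return lst_of_actions_stats
-- ===== SOURCE B (Python) =====
-- def get_actions_statistics(handle_stats):
-- 	lines = handle_stats.split('\n')
-- 	starts = [i for i, ln in enumerate(lines) if ln.split(' ')[0] == 'action']
-- 	bounds = starts + [len(lines)]
-- 	return ['\n'.join(lines[bounds[k]:bounds[k + 1]]) + '\n' for k in range(len(starts))]
-- ===== Notes on version B (the rewrite author's own statement) =====
-- stated objective: alternative
-- what changed: Replaces A's single pass with a flag and an incrementally grown block string by two passes: one pass collects the indices of the marker lines (those whose first space-separated token is the action keyword), then each block is produced at once by joining the slice of lines between consecutive marker indices.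
import Mathlib
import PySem

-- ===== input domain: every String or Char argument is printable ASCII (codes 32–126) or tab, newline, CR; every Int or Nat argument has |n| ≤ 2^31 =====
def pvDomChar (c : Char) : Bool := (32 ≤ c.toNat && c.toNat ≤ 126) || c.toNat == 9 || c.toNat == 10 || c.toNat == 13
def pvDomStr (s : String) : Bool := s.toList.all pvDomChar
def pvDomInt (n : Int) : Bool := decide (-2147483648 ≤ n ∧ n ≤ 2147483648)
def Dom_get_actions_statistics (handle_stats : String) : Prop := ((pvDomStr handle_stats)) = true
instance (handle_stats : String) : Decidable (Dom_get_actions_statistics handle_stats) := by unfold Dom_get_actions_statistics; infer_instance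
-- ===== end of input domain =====

-- B replaces A's incremental accumulation (flag + growing block string) by two passes: collect the
-- indices of the 'action' marker lines, then join each slice between consecutive markers ('alternative').
-- Return values only; neither version mutates anything.

-- ===== PORT A =====
-- marker test of A: len(line.split(' ')) > 0 and line.split(' ')[0] == 'action'
def pvIsActionA (line : List Char) : Bool :=
  decide (0 < (PySem.Chars.splitOn line [' ']).length) &&
    (PySem.List.pyGet? (PySem.Chars.splitOn line [' ']) 0 == some "action".toList)

-- loop body of A; state = (lst_of_actions_stats, action, start_flag)
def pvStepA (st : List (List Char) × List Char × Bool) (line : List Char) :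
    List (List Char) × List Char × Bool :=
  if pvIsActionA line then
    ((if st.2.1 ≠ [] then st.1 ++ [st.2.1] else st.1), line ++ ['\n'], true)
  else if st.2.2 then (st.1, st.2.1 ++ (line ++ ['\n']), st.2.2)
  else st

-- the final "if action != '': append" of A
def pvFin (st : List (List Char) × List Char × Bool) : List (List Char) :=
  if st.2.1 ≠ [] then st.1 ++ [st.2.1] else st.1

def get_actions_statistics (handle_stats : String) : List String :=
  (pvFin ((PySem.Chars.splitOn handle_stats.toList ['\n']).foldl pvStepA ([], [], false))).map
    fun cs => String.ofList cs

-- ===== PORT B =====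
-- marker test of B: line.split(' ')[0] == 'action'
def pvIsActionB (line : List Char) : Bool :=
  PySem.List.pyGet? (PySem.Chars.splitOn line [' ']) 0 == some "action".toList

def get_actions_statistics_alt (handle_stats : String) : List String :=
  let lines := PySem.Chars.splitOn handle_stats.toList ['\n']
  let starts : List Int := (PySem.List.enumerate lines).filterMap
      (fun p => if pvIsActionB p.2 then some p.1 else none)
  let bounds : List Int := starts ++ [(lines.length : Int)]
  (PySem.List.pyRange 0 (starts.length : Int)).map fun k =>
    String.ofList (PySem.Chars.join ['\n']
        (PySem.List.slice lines (some (PySem.List.pyGetD bounds k 0))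
          (some (PySem.List.pyGetD bounds (k + 1) 0))) ++ ['\n'])

-- ===== PRECONDITION & SPEC =====
def Spec_get_actions_statistics (handle_stats : String) (out : List String) : Prop := out = get_actions_statistics_alt handle_stats
instance (handle_stats : String) (out : List String) : Decidable (Spec_get_actions_statistics handle_stats out) := by unfold Spec_get_actions_statistics; infer_instance

-- ===== CLAIM (what is proved, stated in full; the proofs are below) =====
def Claim_equal_get_actions_statistics : Prop := ∀ (handle_stats : String), Dom_get_actions_statistics handle_stats → Spec_get_actions_statistics handle_stats (get_actions_statistics handle_stats)

-- ===== LEMMAS AND PROOFS =====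

-- line.split(' ') is never empty, so A's length guard is vacuous and the two marker tests agree
theorem pv_go_ne_nil (sep : List Char) : ∀ (fuel : Nat) (l cur : List Char) (acc : List (List Char)),
    PySem.Chars.splitOn.go sep fuel l cur acc ≠ [] := by
  intro fuel
  induction fuel with
  | zero => intro l cur acc; simp [PySem.Chars.splitOn.go]
  | succ n ih =>
    intro l cur acc
    cases l with
    | nil => simp [PySem.Chars.splitOn.go]
    | cons c rest =>
      rw [PySem.Chars.splitOn.go]
      split
      · exact ih _ _ _
      · exact ih _ _ _

theorem pv_splitOn_ne_nil (cs sep : List Char) : PySem.Chars.splitOn cs sep ≠ [] := by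
  unfold PySem.Chars.splitOn; exact pv_go_ne_nil _ _ _ _ _

theorem pv_marker_eq (line : List Char) : pvIsActionA line = pvIsActionB line := by
  unfold pvIsActionA pvIsActionB
  have h := pv_splitOn_ne_nil line [' ']
  have : 0 < (PySem.Chars.splitOn line [' ']).length := List.length_pos_of_ne_nil h
  simp [this]

-- a finished block: every line of the segment followed by '\n'
def pvBlockNl (b : List (List Char)) : List Char := (b.map (fun l => l ++ ['\n'])).flatten

-- the segments: each starts at a marker line and runs to the next marker (prefix before the first marker dropped)
def pvChunks : List (List Char) → List (List (List Char))
  | [] => []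
  | l :: ls =>
    if pvIsActionB l then
      (l :: ls.takeWhile (fun x => !pvIsActionB x)) :: pvChunks (ls.dropWhile (fun x => !pvIsActionB x))
    else pvChunks ls
  termination_by ls => ls.length
  decreasing_by
    · simp only [List.length_cons]; exact Nat.lt_succ_of_le (List.length_dropWhile_le _ _)
    · simp only [List.length_cons]; omega

theorem pvChunks_cons (l : List Char) (ls : List (List Char)) :
    pvChunks (l :: ls) = if pvIsActionB l then
      (l :: ls.takeWhile (fun x => !pvIsActionB x)) :: pvChunks (ls.dropWhile (fun x => !pvIsActionB x))
    else pvChunks ls := by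
  rw [pvChunks.eq_def]

theorem pv_chunks_ne_nil : ∀ (ls : List (List Char)), ∀ c ∈ pvChunks ls, c ≠ [] := by
  intro ls
  induction ls using pvChunks.induct with
  | case1 => simp [pvChunks]
  | case2 l ls h ih =>
    rw [pvChunks_cons, if_pos h]
    intro c hc
    rcases List.mem_cons.1 hc with rfl | hc
    · simp
    · exact ih c hc
  | case3 l ls h ih =>
    rw [pvChunks_cons, if_neg h]; exact ih

theorem pv_chunks_dropWhile (ls : List (List Char)) :
    pvChunks (ls.dropWhile (fun x => !pvIsActionB x)) = pvChunks ls := by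
  induction ls with
  | nil => simp
  | cons l ls ih =>
    by_cases h : pvIsActionB l
    · simp [h]
    · rw [List.dropWhile_cons]
      simp only [h, Bool.not_false, if_true]
      rw [ih, pvChunks_cons, if_neg h]

-- ===== A-side characterisation =====
theorem pv_loopA_true (ls : List (List Char)) : ∀ (lst : List (List Char)) (a : List Char), a ≠ [] →
    pvFin (ls.foldl pvStepA (lst, a, true)) =
      (lst ++ [a ++ pvBlockNl (ls.takeWhile (fun x => !pvIsActionB x))]) ++
        (pvChunks (ls.dropWhile (fun x => !pvIsActionB x))).map pvBlockNl := by
  induction ls with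
  | nil => intro lst a ha; simp [pvFin, ha, pvChunks, pvBlockNl]
  | cons l ls ih =>
    intro lst a ha
    by_cases h : pvIsActionB l
    · rw [List.foldl_cons]
      have hstep : pvStepA (lst, a, true) l = (lst ++ [a], l ++ ['\n'], true) := by
        simp [pvStepA, pv_marker_eq, h, ha]
      rw [hstep, ih (lst ++ [a]) (l ++ ['\n']) (by simp)]
      have ht : List.takeWhile (fun x => !pvIsActionB x) (l :: ls) = [] := by
        simp [h]
      have hd : List.dropWhile (fun x => !pvIsActionB x) (l :: ls) = l :: ls := by
        simp [h]
      rw [ht, hd, pvChunks_cons, if_pos h]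
      simp [pvBlockNl]
    · rw [List.foldl_cons]
      have hstep : pvStepA (lst, a, true) l = (lst, a ++ (l ++ ['\n']), true) := by
        simp [pvStepA, pv_marker_eq, h]
      rw [hstep, ih lst (a ++ (l ++ ['\n'])) (by simp)]
      have ht : List.takeWhile (fun x => !pvIsActionB x) (l :: ls) =
          l :: List.takeWhile (fun x => !pvIsActionB x) ls := by
        simp [h]
      have hd : List.dropWhile (fun x => !pvIsActionB x) (l :: ls) =
          List.dropWhile (fun x => !pvIsActionB x) ls := by
        simp [h]
      rw [ht, hd]
      simp [pvBlockNl]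

theorem pv_loopA_start (ls : List (List Char)) : ∀ (lst : List (List Char)),
    pvFin (ls.foldl pvStepA (lst, [], false)) = lst ++ (pvChunks ls).map pvBlockNl := by
  induction ls with
  | nil => intro lst; simp [pvFin, pvChunks]
  | cons l ls ih =>
    intro lst
    by_cases h : pvIsActionB l
    · rw [List.foldl_cons]
      have hstep : pvStepA (lst, [], false) l = (lst, l ++ ['\n'], true) := by
        simp [pvStepA, pv_marker_eq, h]
      rw [hstep, pv_loopA_true ls lst (l ++ ['\n']) (by simp)]
      rw [pvChunks_cons, if_pos h]
      simp [pvBlockNl]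
    · rw [List.foldl_cons]
      have hstep : pvStepA (lst, [], false) l = (lst, [], false) := by
        simp [pvStepA, pv_marker_eq, h]
      rw [hstep, ih lst, pvChunks_cons, if_neg h]

theorem pvA_eq (h : String) :
    get_actions_statistics h =
      ((pvChunks (PySem.Chars.splitOn h.toList ['\n'])).map pvBlockNl).map
        (fun cs => String.ofList cs) := by
  unfold get_actions_statistics
  rw [pv_loopA_start _ []]
  simp

-- ===== B-side characterisation =====
def pvStartsOf : List (List Char) → List Nat
  | [] => []
  | l :: ls =>
    if pvIsActionB l then 0 :: (pvStartsOf ls).map (fun n => n + 1)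
    else (pvStartsOf ls).map (fun n => n + 1)

def pvPairMap {α β : Type} (f : α → α → β) : List α → α → List β
  | [], _ => []
  | b :: bs, last => f b (bs.headD last) :: pvPairMap f bs last

theorem pv_starts_eq (ls : List (List Char)) : ∀ (off : Int),
    (PySem.List.enumerate ls off).filterMap (fun p => if pvIsActionB p.2 then some p.1 else none) =
      (pvStartsOf ls).map (fun n : Nat => off + (n : Int)) := by
  induction ls with
  | nil => intro off; simp [PySem.List.enumerate_nil, pvStartsOf]
  | cons l ls ih =>
    intro off
    have hm : List.map (fun n : Nat => off + (n : Int)) ((pvStartsOf ls).map (fun n : Nat => n + 1)) =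
        List.map (fun n : Nat => (off + 1) + (n : Int)) (pvStartsOf ls) := by
      rw [List.map_map]
      apply List.map_congr_left; intro n _
      simp only [Function.comp]; push_cast; ring
    rw [PySem.List.enumerate_cons, List.filterMap_cons, pvStartsOf]
    by_cases h : pvIsActionB l
    · simp only [h, reduceIte, List.map_cons, hm, ih (off + 1)]
      simp
    · simp only [h, Bool.false_eq_true, reduceIte, hm, ih (off + 1)]

theorem pv_rangePairs {β : Type} (f : Int → Int → β) : ∀ (bs : List Int) (L : Int),
    (List.range bs.length).map (fun k =>
        f ((bs ++ [L]).getD k 0) ((bs ++ [L]).getD (k + 1) 0)) = pvPairMap f bs L := by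
  intro bs
  induction bs with
  | nil => intro L; simp [pvPairMap]
  | cons b bs ih =>
    intro L
    rw [List.length_cons, List.range_succ_eq_map, List.map_cons, List.map_map, pvPairMap]
    congr 1
    · cases bs <;> simp
    · rw [← ih L]
      apply List.map_congr_left; intro k _
      simp [Function.comp]

theorem pv_pairMap_shift {β : Type} (f g : Nat → Nat → β)
    (hfg : ∀ i j, f (i + 1) (j + 1) = g i j) :
    ∀ (bs : List Nat) (L : Nat), pvPairMap f (bs.map (fun n => n + 1)) (L + 1) = pvPairMap g bs L := by
  intro bs
  induction bs with
  | nil => intro L; simp [pvPairMap]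
  | cons b bs ih =>
    intro L
    rw [List.map_cons, pvPairMap, pvPairMap, ih L]
    congr 1
    have : (((bs.map (fun n => n + 1))).headD (L + 1)) = bs.headD L + 1 := by cases bs <;> simp
    rw [this, hfg]

theorem pv_headD_starts (ls : List (List Char)) :
    (pvStartsOf ls).headD ls.length = (ls.takeWhile (fun x => !pvIsActionB x)).length := by
  induction ls with
  | nil => simp [pvStartsOf]
  | cons l ls ih =>
    rw [pvStartsOf, List.takeWhile_cons]
    by_cases h : pvIsActionB l
    · simp [h]
    · simp only [h, Bool.false_eq_true, reduceIte, Bool.not_false, List.length_cons]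
      cases hS : pvStartsOf ls with
      | nil => rw [hS] at ih; simpa using ih
      | cons a as => rw [hS] at ih; simpa using ih

theorem pv_take_takeWhile {α : Type} (p : α → Bool) (ls : List α) :
    ls.take (ls.takeWhile p).length = ls.takeWhile p := by
  induction ls with
  | nil => simp
  | cons l ls ih =>
    rw [List.takeWhile_cons]
    by_cases h : p l
    · simp [h, ih]
    · simp [h]

theorem pv_segs (ls : List (List Char)) :
    pvPairMap (fun a b => (ls.drop a).take (b - a)) (pvStartsOf ls) ls.length = pvChunks ls := by
  induction ls with
  | nil => simp [pvStartsOf, pvPairMap, pvChunks]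
  | cons l ls ih =>
    rw [pvStartsOf, pvChunks_cons]
    by_cases h : pvIsActionB l
    · simp only [h, reduceIte]
      rw [pvPairMap]
      congr 1
      · have hh : ((pvStartsOf ls).map (fun n => n + 1)).headD (l :: ls).length =
            (ls.takeWhile (fun x => !pvIsActionB x)).length + 1 := by
          cases hS : pvStartsOf ls with
          | nil =>
            have := pv_headD_starts ls; rw [hS] at this
            simp [List.length_cons, ← this]
          | cons a as =>
            have := pv_headD_starts ls; rw [hS] at this
            simp [← this]
        rw [hh]
        simp [pv_take_takeWhile]
      · rw [List.length_cons,
          pv_pairMap_shift _ (fun a b => (ls.drop a).take (b - a)) (by intro i j; simp) _ _, ih,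
          pv_chunks_dropWhile]
    · simp only [h, Bool.false_eq_true, reduceIte]
      rw [List.length_cons,
        pv_pairMap_shift _ (fun a b => (ls.drop a).take (b - a)) (by intro i j; simp) _ _, ih]

theorem pv_pairMap_cast {β : Type} (f : Int → Int → β) (g : Nat → Nat → β)
    (hfg : ∀ (i j : Nat), f (i : Int) (j : Int) = g i j) :
    ∀ (bs : List Nat) (L : Nat),
      pvPairMap f (bs.map (fun n : Nat => (n : Int))) (L : Int) = pvPairMap g bs L := by
  intro bs
  induction bs with
  | nil => intro L; simp [pvPairMap]
  | cons b bs ih =>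
    intro L
    rw [List.map_cons, pvPairMap, pvPairMap, ih L]
    congr 1
    have : ((bs.map (fun n : Nat => (n : Int))).headD (L : Int)) = ((bs.headD L : Nat) : Int) := by
      cases bs <;> simp
    rw [this, hfg]

theorem pv_pairMap_post {α β γ : Type} (f : α → α → β) (h : β → γ) :
    ∀ (bs : List α) (L : α), pvPairMap (fun a b => h (f a b)) bs L = (pvPairMap f bs L).map h := by
  intro bs
  induction bs with
  | nil => intro L; simp [pvPairMap]
  | cons b bs ih => intro L; rw [pvPairMap, pvPairMap, List.map_cons, ih L]

theorem pvB_eq (h : String) :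
    get_actions_statistics_alt h =
      (pvChunks (PySem.Chars.splitOn h.toList ['\n'])).map
        (fun b => String.ofList (PySem.Chars.join ['\n'] b ++ ['\n'])) := by
  simp only [get_actions_statistics_alt]
  set lines := PySem.Chars.splitOn h.toList ['\n'] with hl
  rw [pv_starts_eq lines 0]
  have hz : (pvStartsOf lines).map (fun n : Nat => (0 : Int) + (n : Int)) =
      (pvStartsOf lines).map (fun n : Nat => (n : Int)) := by
    apply List.map_congr_left; intro n _; ring
  rw [hz]
  set S : List Int := (pvStartsOf lines).map (fun n : Nat => (n : Int)) with hS
  set B : List Int := S ++ [(lines.length : Int)] with hB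
  set f : Int → Int → String := fun a b =>
    String.ofList (PySem.Chars.join ['\n'] (PySem.List.slice lines (some a) (some b)) ++ ['\n']) with hf
  rw [List.length_map, PySem.List.pyRange_zero_natCast, List.map_map]
  have hstep : List.map ((fun k : Int =>
        String.ofList (PySem.Chars.join ['\n']
          (PySem.List.slice lines (some (PySem.List.pyGetD B k 0))
            (some (PySem.List.pyGetD B (k + 1) 0))) ++ ['\n'])) ∘ (fun k : Nat => (k : Int)))
        (List.range (pvStartsOf lines).length) =
      List.map (fun k : Nat => f ((S ++ [(lines.length : Int)]).getD k 0)
        ((S ++ [(lines.length : Int)]).getD (k + 1) 0)) (List.range (pvStartsOf lines).length) := by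
    apply List.map_congr_left; intro k _
    have h1 : ((k : Int) + 1) = ((k + 1 : Nat) : Int) := by push_cast; ring
    simp only [Function.comp, hf, ← hB, h1, PySem.List.pyGetD_natCast]
  rw [hstep]
  have hlen : (pvStartsOf lines).length = S.length := by rw [hS, List.length_map]
  rw [hlen, pv_rangePairs f S (lines.length : Int)]
  rw [pv_pairMap_cast f (fun a b : Nat => String.ofList (PySem.Chars.join ['\n']
      ((lines.drop a).take (b - a)) ++ ['\n'])) (by
        intro i j
        rw [hf]
        simp only [PySem.List.slice_natCast])]
  rw [pv_pairMap_post (fun a b : Nat => (lines.drop a).take (b - a))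
      (fun seg => String.ofList (PySem.Chars.join ['\n'] seg ++ ['\n']))]
  rw [pv_segs]

theorem pv_join_block (b : List (List Char)) (hb : b ≠ []) :
    PySem.Chars.join ['\n'] b ++ ['\n'] = pvBlockNl b := by
  induction b with
  | nil => exact absurd rfl hb
  | cons p rest ih =>
    cases rest with
    | nil => simp [PySem.Chars.join_singleton, pvBlockNl]
    | cons q r =>
      rw [PySem.Chars.join_cons_cons, pvBlockNl, List.map_cons, List.flatten_cons]
      rw [List.append_assoc, List.append_assoc, ih (by simp)]
      simp [pvBlockNl]

-- ===== VERDICT (by name: the statement is the Claim_ definition above) =====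
theorem get_actions_statistics_spec : Claim_equal_get_actions_statistics := by
  intro h _
  unfold Spec_get_actions_statistics
  rw [pvA_eq, pvB_eq, List.map_map]
  refine List.map_congr_left ?_
  intro b hb
  simp only [Function.comp]
  rw [pv_join_block b (pv_chunks_ne_nil _ b hb)]
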